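-- pv_equiv track=rewrite | github.com/aicompanionx/XBuddy-API | app/services/twitter.py | score_to_level
-- ===== SOURCE A (Python) =====
-- def score_to_level(score: int) -> str:
--     """
--     Return the corresponding influence level based on the score
--     """
--     level_map = {
--         (0, 100): {"level": "Level 1", "name": "Stealth", "name_en": "Stealth"},
--         (100, 400): {"level": "Level 2", "name": "Low", "name_en": "Low"},
--         (400, 1000): {
--             "level": "Level 3",
--             "name": "Developing",
--             "name_en": "Developing",
--         },
--         (1000, 2000): {
--             "level": "Level 4",
--             "name": "Established",
--             "name_en": "Established",
--         },
--         (2000, 4000): {"level": "Level 5", "name": "Medium", "name_en": "Medium"},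
--         (4000, 8000): {"level": "Level 6", "name": "High", "name_en": "High"},
--         (8000, 16000): {"level": "Level 7", "name": "Peak", "name_en": "Peak"},
--         (16000, float("inf")): {"level": "Level 8", "name": "Top", "name_en": "Top"},
--     }
--
--     for (min_score, max_score), level_info in level_map.items():
--         if min_score <= score < max_score:
--             return level_info["level"]
--
--     # Default to the lowest level
--     return level_map[(0, 100)]["level"]
-- ===== SOURCE B (Python) =====
-- import bisect
--
-- _THRESHOLDS = [100, 400, 1000, 2000, 4000, 8000, 16000]
-- _LEVELS = ["Level 1", "Level 2", "Level 3", "Level 4",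
--            "Level 5", "Level 6", "Level 7", "Level 8"]
--
--
-- def score_to_level(score: int) -> str:
--     """Return the corresponding influence level based on the score."""
--     return _LEVELS[bisect.bisect_right(_THRESHOLDS, score)]
-- ===== Notes on version B (the rewrite author's own statement) =====
-- stated objective: idiomatic
-- what changed: Replaced the linear scan over (min,max)->dict range entries with a binary search (bisect_right) into a sorted threshold list paired with a level table.
import Mathlib
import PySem

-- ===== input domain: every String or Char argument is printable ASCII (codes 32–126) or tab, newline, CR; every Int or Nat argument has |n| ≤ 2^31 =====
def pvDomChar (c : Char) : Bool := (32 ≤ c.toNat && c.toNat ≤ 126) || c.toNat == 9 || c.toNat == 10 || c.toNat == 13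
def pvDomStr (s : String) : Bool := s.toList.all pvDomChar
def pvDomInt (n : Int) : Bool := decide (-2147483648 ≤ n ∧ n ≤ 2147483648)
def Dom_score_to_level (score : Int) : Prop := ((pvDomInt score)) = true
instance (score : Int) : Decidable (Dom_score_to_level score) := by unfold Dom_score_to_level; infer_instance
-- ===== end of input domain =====

-- B replaces A's linear scan over (min,max) range entries by a bisect_right into a
-- sorted threshold table (more idiomatic; same exact behaviour).

-- ===== PORT A =====
-- A's level_map: ((min, max), level); max = none stands for float("inf").
def pvLevelMap : List ((Int × Option Int) × String) :=
  [((0, some 100), "Level 1"), ((100, some 400), "Level 2"),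
   ((400, some 1000), "Level 3"), ((1000, some 2000), "Level 4"),
   ((2000, some 4000), "Level 5"), ((4000, some 8000), "Level 6"),
   ((8000, some 16000), "Level 7"), ((16000, none), "Level 8")]

-- the for-loop over level_map.items(); fallthrough returns "Level 1"
def pvScanA (score : Int) : List ((Int × Option Int) × String) → String
  | [] => "Level 1"
  | ((mn, mx), lvl) :: rest =>
      match mx with
      | some m => if mn ≤ score ∧ score < m then lvl else pvScanA score rest
      | none => if mn ≤ score then lvl else pvScanA score rest

def score_to_level (score : Int) : String := pvScanA score pvLevelMap

-- ===== PORT B =====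
def pvThresholds : List Int := [100, 400, 1000, 2000, 4000, 8000, 16000]
def pvLevels : List String :=
  ["Level 1", "Level 2", "Level 3", "Level 4", "Level 5", "Level 6", "Level 7", "Level 8"]

-- bisect.bisect_right on a sorted list = number of elements ≤ score
def pvBisectRight (xs : List Int) (score : Int) : Nat := xs.countP (· ≤ score)

def score_to_level_alt (score : Int) : String :=
  (PySem.List.pyGet? pvLevels (pvBisectRight pvThresholds score : Int)).getD ""

-- ===== PRECONDITION & SPEC =====
def Spec_score_to_level (score : Int) (out : String) : Prop := out = score_to_level_alt score
instance (score : Int) (out : String) : Decidable (Spec_score_to_level score out) := by unfold Spec_score_to_level; infer_instance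

-- ===== CLAIM (what is proved, stated in full; the proofs are below) =====
def Claim_equal_score_to_level : Prop := ∀ (score : Int), Dom_score_to_level score → Spec_score_to_level score (score_to_level score)

-- ===== LEMMAS AND PROOFS =====

-- ===== VERDICT (by name: the statement is the Claim_ definition above) =====
set_option maxHeartbeats 1000000 in
theorem score_to_level_spec : Claim_equal_score_to_level := by
  intro score _
  unfold Spec_score_to_level score_to_level score_to_level_alt pvLevelMap
    pvBisectRight pvThresholds pvLevels
  simp only [pvScanA, List.countP_cons, List.countP_nil, decide_eq_true_eq]
  split_ifs <;> first | omega | decide
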